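-- pv_equiv track=rewrite | github.com/csprock/keras-NER | validation_prototype.py | sentence_metrics
-- ===== SOURCE A (Python) =====
-- def sentence_metrics(predicted, actual):
--     '''
--     Return number of true positives (tp) and actual positives(cp) in between
--     a predicted and target sentence.
--     '''
--     cp, tp = 0, 0
--     n = len(predicted)
--     start_ne = list()
--     for i, s in enumerate(actual):
--         if s[0] == 'B':
--             cp += 1
--             start_ne.append(i)
--
--
--     for start_i in start_ne:
--
--         i = start_i
--         while i < n and actual[i][0] in ['B','I']:
--
--             if actual[i][0] == predicted[i][0]:
--                 found = True
--             else:
--                 found = False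
--             i += 1
--
--         if found and i < n:
--             if actual[i][0] == predicted[i][0]:
--                 tp += 1
--         elif found:
--             tp += 1
--         else:
--             pass
--
--     return tp, cp
-- ===== SOURCE B (Python) =====
-- def sentence_metrics(predicted, actual):
--     # Single pass over the maximal B/I blocks of `actual` (paired with `predicted`, so
--     # the scan is bounded by both lengths): A's per-start result depends only on the
--     # block end, so each block with b B-starts contributes b * ok(block) at once.
--     n = len(predicted)
--     m = min(n, len(actual))
--     tp, cp = 0, 0
--     i = 0
--     while i < m:
--         if actual[i][0] in ('B', 'I'):
--             e, b = i, 0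
--             while e < m and actual[e][0] in ('B', 'I'):
--                 if actual[e][0] == 'B':
--                     b += 1
--                 e += 1
--             if b:
--                 ok = actual[e - 1][0] == predicted[e - 1][0] and (e == n or actual[e][0] == predicted[e][0])
--                 if ok:
--                     tp += b
--             cp += b
--             i = e + 1
--         else:
--             i += 1
--     return tp, cp
-- ===== Notes on version B (the rewrite author's own statement) =====
-- stated objective: alternative
-- what changed: Instead of re-walking the B/I span from every B start (nested loops), B scans actual once, finds each maximal B/I block, and adds the block's B-start count when the block's single end-condition holds, since A's per-start result depends only on the block end.
-- outside the precondition, e.g. on sentence_metrics(['B-x'], ['B-x', 'B-y']): A returns (2, 2), B returns (1, 1); on sentence_metrics(['', 'B-x'], ['O', 'B-x']): A returns (1, 1), B returns (1, 1)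
import Mathlib
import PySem

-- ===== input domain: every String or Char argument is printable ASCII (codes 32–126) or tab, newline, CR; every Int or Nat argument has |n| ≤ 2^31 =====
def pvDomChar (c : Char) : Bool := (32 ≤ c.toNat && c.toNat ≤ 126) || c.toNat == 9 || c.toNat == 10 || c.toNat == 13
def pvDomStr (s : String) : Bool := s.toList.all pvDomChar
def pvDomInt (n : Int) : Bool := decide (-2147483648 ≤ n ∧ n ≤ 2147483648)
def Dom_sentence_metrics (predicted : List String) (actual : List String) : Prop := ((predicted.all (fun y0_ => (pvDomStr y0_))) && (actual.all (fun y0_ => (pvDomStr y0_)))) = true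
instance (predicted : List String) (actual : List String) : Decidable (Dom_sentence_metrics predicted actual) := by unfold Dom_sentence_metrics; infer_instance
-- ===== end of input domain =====

-- B replaces A's per-B-start re-walk of each B/I span by one left-to-right scan over
-- maximal B/I blocks, adding the block's B count when the block's end condition holds;
-- objective: alternative (a different algorithm of similar cost).

-- s[0] as a Char (Pre_ excludes empty strings, where Python raises IndexError)
def pvHd (s : String) : Char := s.toList.headD ' '
-- actual[i][0] in ['B','I']
def pvBI (a : List String) (i : Int) : Bool :=
  pvHd (PySem.List.pyGetD a i "") == 'B' || pvHd (PySem.List.pyGetD a i "") == 'I'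
-- actual[i][0] == 'B'  (on an index)
def pvIsB (a : List String) (i : Int) : Bool := pvHd (PySem.List.pyGetD a i "") == 'B'
-- actual[i][0] == predicted[i][0]
def pvMt (p a : List String) (i : Int) : Bool :=
  pvHd (PySem.List.pyGetD a i "") == pvHd (PySem.List.pyGetD p i "")

-- ===== PORT A =====
-- the inner while loop; fuel (n - i).toNat bounds it exactly (i increases, i < n required).
-- `found` is threaded through the outer fold like Python's leftover local; inside Pre_ the
-- while body always runs at least once (each start is a 'B'), so the initial false is never read.
def pvWhileA (predicted actual : List String) (n : Int) : Int → Bool → Nat → Int × Bool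
  | i, found, 0 => (i, found)
  | i, found, fuel+1 =>
    if decide (i < n) && pvBI actual i then
      pvWhileA predicted actual n (i+1) (pvMt predicted actual i) fuel
    else (i, found)

def sentence_metrics (predicted : List String) (actual : List String) : Int × Int :=
  let n : Int := predicted.length
  let st1 := (PySem.List.enumerate actual).foldl
    (fun (st : Int × List Int) is =>
      if pvHd is.2 == 'B' then (st.1 + 1, st.2 ++ [is.1]) else st)
    ((0 : Int), ([] : List Int))
  let st2 := st1.2.foldl
    (fun (st : Int × Bool) start_i =>
      let r := pvWhileA predicted actual n start_i st.2 (n - start_i).toNat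
      if r.2 && decide (r.1 < n) then
        (if pvMt predicted actual r.1 then st.1 + 1 else st.1, r.2)
      else if r.2 then (st.1 + 1, r.2) else (st.1, r.2))
    ((0 : Int), false)
  (st2.1, st1.1)

-- ===== PORT B =====
-- inner while of Source B: advance e to the end of the B/I block (bounded by m), counting B
-- starts into b; fuel (m - e).toNat bounds the loop exactly (e increases, e < m required)
def pvBlockEnd (actual : List String) (m : Int) : Int -> Int -> Nat -> Int × Int
  | e, b, 0 => (e, b)
  | e, b, fuel+1 =>
    if decide (e < m) && pvBI actual e then
      pvBlockEnd actual m (e+1) (if pvIsB actual e then b+1 else b) fuel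
    else (e, b)

-- outer while of Source B; fuel m.toNat bounds it exactly (i strictly increases, i < m required)
def pvScanB (predicted actual : List String) (n m : Int) : Int -> Int -> Int -> Nat -> Int × Int
  | _, tp, cp, 0 => (tp, cp)
  | i, tp, cp, fuel+1 =>
    if i < m then
      if pvBI actual i then
        let r := pvBlockEnd actual m i 0 (m - i).toNat
        if r.2 == 0 then
          pvScanB predicted actual n m (r.1 + 1) tp (cp + r.2) fuel
        else
          let ok := pvMt predicted actual (r.1 - 1) && (r.1 == n || pvMt predicted actual r.1)
          pvScanB predicted actual n m (r.1 + 1) (if ok then tp + r.2 else tp) (cp + r.2) fuel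
      else pvScanB predicted actual n m (i+1) tp cp fuel
    else (tp, cp)

def sentence_metrics_alt (predicted : List String) (actual : List String) : Int × Int :=
  pvScanB predicted actual (predicted.length : Int)
    (min (predicted.length : Int) (actual.length : Int)) 0 0 0
    (min predicted.length actual.length)

-- ===== PRECONDITION & SPEC =====
-- Pre_ admits equal-length all-nonempty inputs (A's intended domain) and, whatever the
-- lengths, inputs whose `actual` has no 'B' start (A trivially returns (0, 0) there).
-- It excludes the remaining inputs: there A usually raises (IndexError on s[0] or
-- actual[i], NameError on `found`), and where it still returns, its value reuses a stale
-- `found` or counts entities beyond predicted's length (see claim cites), or the input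
-- merely has an empty predicted entry at a position no B/I walk touches.
def Pre_sentence_metrics (predicted : List String) (actual : List String) : Prop :=
  (∀ s ∈ actual, s ≠ "") ∧
    ((predicted.length = actual.length ∧ ∀ s ∈ predicted, s ≠ "") ∨
      (∀ s ∈ actual, s.toList.headD ' ' ≠ 'B'))
instance (predicted : List String) (actual : List String) : Decidable (Pre_sentence_metrics predicted actual) := by unfold Pre_sentence_metrics; infer_instance

def pvWitness_sentence_metrics : List String × List String := (["B-x", "O"], ["B-x", "I-x"])

def Spec_sentence_metrics (predicted : List String) (actual : List String) (out : Int × Int) : Prop := out = sentence_metrics_alt predicted actual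
instance (predicted : List String) (actual : List String) (out : Int × Int) : Decidable (Spec_sentence_metrics predicted actual out) := by unfold Spec_sentence_metrics; infer_instance

-- ===== CLAIM (what is proved, stated in full; the proofs are below) =====
def Claim_equal_sentence_metrics : Prop := ∀ (predicted : List String) (actual : List String), Dom_sentence_metrics predicted actual → Pre_sentence_metrics predicted actual → Spec_sentence_metrics predicted actual (sentence_metrics predicted actual)

-- ===== LEMMAS AND PROOFS =====

-- end of the maximal B/I block starting at i (bounded by n)
def pvE (a : List String) (n i : Int) : Int :=
  if decide (i < n) && pvBI a i then pvE a n (i+1) else i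
termination_by (n - i).toNat
decreasing_by simp only [Bool.and_eq_true, decide_eq_true_eq] at *; omega

-- number of B starts inside the block starting at i
def pvNB (a : List String) (n i : Int) : Int :=
  if decide (i < n) && pvBI a i then (if pvIsB a i then 1 else 0) + pvNB a n (i+1) else 0
termination_by (n - i).toNat
decreasing_by simp only [Bool.and_eq_true, decide_eq_true_eq] at *; omega

-- A's post-walk acceptance condition at block end e
def pvOKp (p a : List String) (n e : Int) : Bool :=
  pvMt p a (e-1) && (e == n || pvMt p a e)

-- Σ_{i ≤ j < n, actual[j] a B start} [pvOKp at block end of j]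
def pvS (p a : List String) (n i : Int) : Int :=
  if i < n then (if pvIsB a i && pvOKp p a n (pvE a n i) then 1 else 0) + pvS p a n (i+1) else 0
termination_by (n - i).toNat
decreasing_by omega

-- number of B starts in [i, n)
def pvCB (a : List String) (n i : Int) : Int :=
  if i < n then (if pvIsB a i then 1 else 0) + pvCB a n (i+1) else 0
termination_by (n - i).toNat
decreasing_by omega

-- A's start_ne list, index form
def pvSL (a : List String) (n i : Int) : List Int :=
  if i < n then (if pvIsB a i then [i] else []) ++ pvSL a n (i+1) else []
termination_by (n - i).toNat
decreasing_by omega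

theorem pvE_ge (a : List String) (n i : Int) : i ≤ pvE a n i := by
  unfold pvE
  split
  · have := pvE_ge a n (i+1); omega
  · omega
termination_by (n - i).toNat
decreasing_by simp only [Bool.and_eq_true, decide_eq_true_eq] at *; omega

theorem pvE_le (a : List String) (n i : Int) (h : i ≤ n) : pvE a n i ≤ n := by
  unfold pvE
  split
  case isTrue hc =>
    simp only [Bool.and_eq_true, decide_eq_true_eq] at hc
    exact pvE_le a n (i+1) (by omega)
  case isFalse => omega
termination_by (n - i).toNat
decreasing_by simp only [Bool.and_eq_true, decide_eq_true_eq] at *; omega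

theorem pvIsB_BI (a : List String) (i : Int) (h : pvIsB a i = true) : pvBI a i = true := by
  simp only [pvIsB, beq_iff_eq] at h
  simp [pvBI, h]

-- the inner while of A, started inside a block, lands on the block end with
-- found = the last in-block comparison
theorem pvWhileA_eq (p a : List String) (n : Int) :
    ∀ (fuel : Nat) (i : Int) (found : Bool), (n - i).toNat ≤ fuel →
      (decide (i < n) && pvBI a i) = true →
      pvWhileA p a n i found fuel = (pvE a n i, pvMt p a (pvE a n i - 1)) := by
  intro fuel
  induction fuel with
  | zero =>
    intro i found hf hc
    simp only [Bool.and_eq_true, decide_eq_true_eq] at hc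
    omega
  | succ fuel ih =>
    intro i found hf hc
    rw [pvWhileA, if_pos hc]
    have hiE : pvE a n i = pvE a n (i+1) := by rw [pvE, if_pos hc]
    by_cases hc2 : (decide (i+1 < n) && pvBI a (i+1)) = true
    · rw [ih (i+1) _ (by simp only [Bool.and_eq_true, decide_eq_true_eq] at hc2 ⊢; omega) hc2, hiE]
    · have hE1 : pvE a n (i+1) = i+1 := by rw [pvE, if_neg hc2]
      cases fuel with
      | zero => rw [pvWhileA, hiE, hE1]; simp
      | succ fuel => rw [pvWhileA, if_neg hc2, hiE, hE1]; simp

theorem pvBlockEnd_eq (a : List String) (n : Int) :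
    ∀ (fuel : Nat) (e b : Int), (n - e).toNat ≤ fuel →
      pvBlockEnd a n e b fuel = (pvE a n e, b + pvNB a n e) := by
  intro fuel
  induction fuel with
  | zero =>
    intro e b hf
    have hc : ¬ ((decide (e < n) && pvBI a e) = true) := by
      simp only [Bool.and_eq_true, decide_eq_true_eq, not_and]
      intro h; omega
    rw [pvBlockEnd, pvE, if_neg hc, pvNB, if_neg hc]
    simp
  | succ fuel ih =>
    intro e b hf
    rw [pvBlockEnd]
    by_cases hc : (decide (e < n) && pvBI a e) = true
    · rw [if_pos hc, ih (e+1) _ (by simp only [Bool.and_eq_true, decide_eq_true_eq] at hc; omega)]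
      have hE : pvE a n e = pvE a n (e+1) := by rw [pvE, if_pos hc]
      have hN : pvNB a n e = (if pvIsB a e = true then 1 else 0) + pvNB a n (e+1) := by
        rw [pvNB, if_pos hc]
      rw [hE, hN]
      split <;> (refine Prod.ext rfl ?_; dsimp only; ring)
    · rw [if_neg hc, pvE, if_neg hc, pvNB, if_neg hc]
      simp

-- interior of a block: bounds and stability of the block end
theorem pvS_block (p a : List String) (n i : Int) (h : i ≤ n) :
    pvS p a n i = (if pvOKp p a n (pvE a n i) = true then pvNB a n i else 0) + pvS p a n (pvE a n i + 1) := by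
  by_cases hc : (decide (i < n) && pvBI a i) = true
  · have hiE : pvE a n i = pvE a n (i+1) := by rw [pvE, if_pos hc]
    have hnb : pvNB a n i = (if pvIsB a i then 1 else 0) + pvNB a n (i+1) := by
      rw [pvNB, if_pos hc]
    simp only [Bool.and_eq_true, decide_eq_true_eq] at hc
    have hrec := pvS_block p a n (i+1) (by omega)
    rw [pvS, if_pos hc.1, hrec, ← hiE, hnb]
    cases hok : pvOKp p a n (pvE a n i)
    · simp [hok]
    · simp only [hok, Bool.and_true, if_pos rfl]
      cases hisb : pvIsB a i <;> simp [hisb] <;> ring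
  · have hE : pvE a n i = i := by rw [pvE, if_neg hc]
    rw [hE]
    have hnb : pvNB a n i = 0 := by rw [pvNB, if_neg hc]
    rw [hnb]
    by_cases hin : i < n
    · have hbi : pvBI a i = false := by
        simp only [Bool.and_eq_true, decide_eq_true_eq, not_and] at hc
        cases hb : pvBI a i
        · rfl
        · exact absurd hb (by simp [hc hin])
      have hisb : pvIsB a i = false := by
        cases hb : pvIsB a i
        · rfl
        · rw [pvIsB_BI a i hb] at hbi; cases hbi
      rw [pvS, if_pos hin, hisb]
      simp
    · rw [pvS, if_neg hin, pvS, if_neg (by omega : ¬ (i + 1 < n))]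
      simp
termination_by (n - i).toNat
decreasing_by simp only [Bool.and_eq_true, decide_eq_true_eq] at *; omega

theorem pvCB_block (a : List String) (n i : Int) (h : i ≤ n) :
    pvCB a n i = pvNB a n i + pvCB a n (pvE a n i + 1) := by
  by_cases hc : (decide (i < n) && pvBI a i) = true
  · have hiE : pvE a n i = pvE a n (i+1) := by rw [pvE, if_pos hc]
    have hnb : pvNB a n i = (if pvIsB a i then 1 else 0) + pvNB a n (i+1) := by
      rw [pvNB, if_pos hc]
    simp only [Bool.and_eq_true, decide_eq_true_eq] at hc
    have hrec := pvCB_block a n (i+1) (by omega)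
    rw [pvCB, if_pos hc.1, hrec, ← hiE, hnb]
    ring
  · have hE : pvE a n i = i := by rw [pvE, if_neg hc]
    have hnb : pvNB a n i = 0 := by rw [pvNB, if_neg hc]
    rw [hE, hnb]
    by_cases hin : i < n
    · have hbi : pvBI a i = false := by
        simp only [Bool.and_eq_true, decide_eq_true_eq, not_and] at hc
        cases hb : pvBI a i
        · rfl
        · exact absurd hb (by simp [hc hin])
      have hisb : pvIsB a i = false := by
        cases hb : pvIsB a i
        · rfl
        · rw [pvIsB_BI a i hb] at hbi; cases hbi
      rw [pvCB, if_pos hin, hisb]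
      simp
    · rw [pvCB, if_neg hin, pvCB, if_neg (by omega : ¬ (i + 1 < n))]
      simp
termination_by (n - i).toNat
decreasing_by simp only [Bool.and_eq_true, decide_eq_true_eq] at *; omega

-- B's scan (with block bound m = n) computes (tp + pvS, cp + pvCB)
theorem pvScanB_eq (p a : List String) (n : Int) :
    ∀ (fuel : Nat) (i tp cp : Int), (n - i).toNat ≤ fuel →
      pvScanB p a n n i tp cp fuel = (tp + pvS p a n i, cp + pvCB a n i) := by
  intro fuel
  induction fuel with
  | zero =>
    intro i tp cp hf
    have hin : ¬ i < n := by omega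
    rw [pvScanB, pvS, if_neg hin, pvCB, if_neg hin]
    simp
  | succ fuel ih =>
    intro i tp cp hf
    rw [pvScanB]
    by_cases hin : i < n
    · rw [if_pos hin]
      by_cases hbi : pvBI a i = true
      · rw [if_pos hbi]
        simp only [pvBlockEnd_eq a n ((n - i).toNat) i 0 le_rfl, zero_add]
        have hEle : pvE a n i ≤ n := pvE_le a n i (by omega)
        have hEge : i ≤ pvE a n i := pvE_ge a n i
        rw [pvS_block p a n i (by omega), pvCB_block a n i (by omega)]
        by_cases hz : (pvNB a n i == 0) = true
        · rw [if_pos hz, ih (pvE a n i + 1) _ _ (by omega)]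
          simp only [beq_iff_eq] at hz
          rw [hz]
          simp only [Prod.mk.injEq]
          constructor
          · split <;> ring
          · ring
        · rw [if_neg hz, ih (pvE a n i + 1) _ _ (by omega)]
          have hok : (pvMt p a (pvE a n i - 1) && (pvE a n i == n || pvMt p a (pvE a n i))) = pvOKp p a n (pvE a n i) := rfl
          rw [hok]
          split <;> simp only [Prod.mk.injEq] <;> constructor <;> ring
      · rw [if_neg hbi, ih (i+1) _ _ (by omega)]
        have hisb : pvIsB a i = false := by
          cases hb : pvIsB a i
          · rfl
          · exact absurd (pvIsB_BI a i hb) hbi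
        have hS : pvS p a n i = pvS p a n (i+1) := by
          rw [pvS, if_pos hin, hisb]; simp
        have hC : pvCB a n i = pvCB a n (i+1) := by
          rw [pvCB, if_pos hin, hisb]; simp
        rw [hS, hC]
    · rw [if_neg hin, pvS, if_neg hin, pvCB, if_neg hin]
      simp

theorem pvScanB_main (p a : List String) (n : Int) (fuel : Nat) (h : n.toNat ≤ fuel) :
    pvScanB p a n n 0 0 0 fuel = (pvS p a n 0, pvCB a n 0) := by
  rw [pvScanB_eq p a n fuel 0 0 0 (by omega)]; simp

-- the no-B-start case: nothing is ever counted
theorem pvIsB_false_of_noB (a : List String) (h : ∀ s ∈ a, s.toList.headD ' ' ≠ 'B') :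
    ∀ i : Int, pvIsB a i = false := by
  intro i
  have hd : PySem.List.pyGetD a i "" = "" ∨ PySem.List.pyGetD a i "" ∈ a := by
    cases hg : PySem.List.pyGet? a i with
    | none => left; simp [PySem.List.pyGetD, hg]
    | some v =>
      right
      have hm := PySem.List.mem_of_pyGet?_eq_some a hg
      simp [PySem.List.pyGetD, hg, hm]
  simp only [pvIsB, pvHd, beq_eq_false_iff_ne, ne_eq]
  rcases hd with hd | hd
  · rw [hd]; simp
  · exact h _ hd

theorem pvBlockEnd_noB (a : List String) (m : Int) (hIsB : ∀ i : Int, pvIsB a i = false) :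
    ∀ (fuel : Nat) (e b : Int), (pvBlockEnd a m e b fuel).2 = b := by
  intro fuel
  induction fuel with
  | zero => intro e b; rfl
  | succ fuel ih =>
    intro e b
    rw [pvBlockEnd]
    split
    · rw [hIsB e]
      simp only [if_neg (by simp : ¬ (false = true))]
      exact ih (e+1) b
    · rfl

theorem pvScanB_noB (p a : List String) (n m : Int) (hIsB : ∀ i : Int, pvIsB a i = false) :
    ∀ (fuel : Nat) (i tp cp : Int), pvScanB p a n m i tp cp fuel = (tp, cp) := by
  intro fuel
  induction fuel with
  | zero => intro i tp cp; rfl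
  | succ fuel ih =>
    intro i tp cp
    rw [pvScanB]
    by_cases hin : i < m
    · rw [if_pos hin]
      by_cases hbi : pvBI a i = true
      · rw [if_pos hbi]
        dsimp only
        rw [pvBlockEnd_noB a m hIsB ((m - i).toNat) i 0]
        simp [ih]
      · rw [if_neg hbi]; exact ih (i+1) tp cp
    · rw [if_neg hin]

theorem pvEnumFold_noB :
    ∀ (a0 : List String), (∀ s ∈ a0, s.toList.headD ' ' ≠ 'B') →
    ∀ (k : Int) (c : Int) (l : List Int),
      (PySem.List.enumerate a0 k).foldl
        (fun (st : Int × List Int) is =>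
          if pvHd is.2 == 'B' then (st.1 + 1, st.2 ++ [is.1]) else st) (c, l) = (c, l) := by
  intro a0
  induction a0 with
  | nil => intro _ k c l; simp [PySem.List.enumerate_nil]
  | cons x xs ih =>
    intro h k c l
    rw [PySem.List.enumerate_cons, List.foldl_cons]
    have hx : (pvHd x == 'B') = false := by
      simp only [pvHd, beq_eq_false_iff_ne, ne_eq]
      exact h x (by simp)
    rw [hx]
    exact ih (fun s hs => h s (by simp [hs])) (k+1) c l

-- A's first loop, in index form over pyRange
theorem pvRangeFold_eq (a : List String) (n : Int) :
    ∀ (i : Int) (c : Int) (l : List Int),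
      (PySem.List.pyRange i n 1).foldl
        (fun (st : Int × List Int) j =>
          if pvHd (PySem.List.pyGetD a j "") == 'B' then (st.1 + 1, st.2 ++ [j]) else st)
        (c, l)
      = (c + pvCB a n i, l ++ pvSL a n i) := by
  intro i c l
  by_cases hin : i < n
  · rw [PySem.List.pyRange_one_cons hin, List.foldl_cons]
    have hrec := fun c' l' => pvRangeFold_eq a n (i+1) c' l'
    rw [pvCB, if_pos hin, pvSL, if_pos hin]
    by_cases hb : pvIsB a i = true
    · simp only [pvIsB] at hb
      rw [if_pos hb, hrec]
      simp only [pvIsB, hb, if_pos, Prod.mk.injEq, List.append_assoc, List.singleton_append,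
        and_true]
      omega
    · simp only [pvIsB] at hb
      rw [if_neg hb, hrec]
      simp only [pvIsB, if_neg hb]
      simp
  · rw [PySem.List.pyRange_one_eq_nil (by omega), pvCB, if_neg hin, pvSL, if_neg hin]
    simp
termination_by i c l => (n - i).toNat
decreasing_by omega

-- every start in start_ne is an in-range B start
theorem pvSL_mem (a : List String) (n : Int) :
    ∀ (i j : Int), j ∈ pvSL a n i → (decide (j < n) && pvBI a j) = true := by
  intro i j hj
  rw [pvSL] at hj
  split at hj
  case isTrue hin =>
    rw [List.mem_append] at hj
    rcases hj with hj | hj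
    · split at hj
      case isTrue hb =>
        simp only [List.mem_singleton] at hj
        subst hj
        simp only [Bool.and_eq_true, decide_eq_true_eq]
        exact ⟨hin, pvIsB_BI a j hb⟩
      case isFalse => simp at hj
    · exact pvSL_mem a n (i+1) j hj
  case isFalse => simp at hj
termination_by i j => (n - i).toNat
decreasing_by omega

-- A's second loop over start_ne sums the per-start contributions
theorem pvSLFold_eq (p a : List String) (n : Int) :
    ∀ (i : Int) (t : Int) (f : Bool),
      ((pvSL a n i).foldl
        (fun (st : Int × Bool) start_i =>
          let r := pvWhileA p a n start_i st.2 (n - start_i).toNat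
          if r.2 && decide (r.1 < n) then
            (if pvMt p a r.1 then st.1 + 1 else st.1, r.2)
          else if r.2 then (st.1 + 1, r.2) else (st.1, r.2))
        (t, f)).1
      = t + pvS p a n i := by
  intro i t f
  by_cases hin : i < n
  · rw [pvSL, if_pos hin, pvS, if_pos hin]
    by_cases hb : pvIsB a i = true
    · rw [if_pos hb, List.singleton_append, List.foldl_cons]
      have hc : (decide (i < n) && pvBI a i) = true := by
        simp only [Bool.and_eq_true, decide_eq_true_eq]
        exact ⟨hin, pvIsB_BI a i hb⟩
      simp only [pvWhileA_eq p a n ((n - i).toNat) i f le_rfl hc]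
      have hEle : pvE a n i ≤ n := pvE_le a n i (by omega)
      rw [pvSLFold_eq p a n (i+1)]
      have hstep :
          (if (pvMt p a (pvE a n i - 1) && decide (pvE a n i < n)) = true then
              (if pvMt p a (pvE a n i) = true then t + 1 else t, pvMt p a (pvE a n i - 1))
            else
              if pvMt p a (pvE a n i - 1) = true then (t + 1, pvMt p a (pvE a n i - 1))
              else (t, pvMt p a (pvE a n i - 1))).1
          = t + (if (pvIsB a i && pvOKp p a n (pvE a n i)) = true then 1 else 0) := by
        simp only [hb, Bool.true_and, pvOKp]
        by_cases h1 : pvMt p a (pvE a n i - 1) = true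
        · by_cases h2 : pvE a n i < n
          · have hne : (pvE a n i == n) = false := by
              simp only [beq_eq_false_iff_ne, ne_eq]; omega
            simp only [h1, hne, decide_eq_true h2, Bool.true_and, Bool.false_or, if_pos rfl]
            by_cases h3 : pvMt p a (pvE a n i) = true
            · simp [h3]
            · simp only [Bool.not_eq_true] at h3
              simp [h3]
          · have heq : (pvE a n i == n) = true := by
              simp only [beq_iff_eq]; omega
            simp only [h1, decide_eq_false h2, Bool.and_false, Bool.true_and, heq,
              Bool.true_or, if_neg (by simp : ¬ (false = true)), if_pos rfl]
            simp
        · simp only [Bool.not_eq_true] at h1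
          simp [h1]
      rw [hstep]
      ring
    · simp only [Bool.not_eq_true] at hb
      rw [if_neg (by simp [hb]), List.nil_append, pvSLFold_eq p a n (i+1)]
      simp only [hb, Bool.false_and, if_neg (by simp : ¬ (false = true))]
      ring
  · rw [pvSL, if_neg hin, pvS, if_neg hin]
    simp
termination_by i t f => (n - i).toNat
decreasing_by all_goals omega

-- ===== VERDICT (by name: the statement is the Claim_ definition above) =====
theorem sentence_metrics_spec : Claim_equal_sentence_metrics := by
  intro predicted actual _hdom hpre
  obtain ⟨_hane, hcases⟩ := hpre
  unfold Spec_sentence_metrics sentence_metrics sentence_metrics_alt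
  rcases hcases with ⟨hlen, -⟩ | hnob
  · -- equal lengths: the scan bound m coincides with n
    have hlen' : (actual.length : Int) = (predicted.length : Int) := by
      exact_mod_cast hlen.symm
    have hmz : min ((predicted.length : Nat) : Int) ((actual.length : Nat) : Int)
        = ((predicted.length : Nat) : Int) := by omega
    have hmi : min predicted.length actual.length = predicted.length := by omega
    rw [hmz, hmi, pvScanB_main predicted actual ((predicted.length : Nat) : Int)
      predicted.length (by simp)]
    have henum : PySem.List.enumerate actual 0
        = (PySem.List.pyRange 0 ((predicted.length : Int)) 1).map
            (fun j => (j, PySem.List.pyGetD actual j "")) := by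
      rw [← hlen']
      simpa using PySem.List.enumerate_eq_map_pyRange actual ""
    have key1 : (PySem.List.enumerate actual 0).foldl
        (fun (st : Int × List Int) is =>
          if pvHd is.2 == 'B' then (st.1 + 1, st.2 ++ [is.1]) else st)
        ((0 : Int), ([] : List Int))
        = (pvCB actual (predicted.length : Int) 0, pvSL actual (predicted.length : Int) 0) := by
      rw [henum, List.foldl_map]
      have h1 := pvRangeFold_eq actual (predicted.length : Int) 0 0 []
      simpa using h1
    have key2 := pvSLFold_eq predicted actual (predicted.length : Int) 0 0 false
    dsimp only
    rw [key1]
    dsimp only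
    rw [key2]
    simp
  · -- no B start in actual: both sides are (0, 0)
    have hIsB : ∀ i : Int, pvIsB actual i = false := pvIsB_false_of_noB actual hnob
    rw [pvScanB_noB predicted actual _ _ hIsB]
    rw [pvEnumFold_noB actual hnob 0 0 []]
    dsimp only
    simp
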